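-- pv_equiv track=rewrite | github.com/noahbt/advent | 2024/p9.py | create_filemap_2
-- ===== SOURCE A (Python) =====
-- def create_filemap_2(diskmap):
--     """
--     2333133121414131402
--     [
--         (index 0, id 0, size 2)
--         (index 2, id -1, size 3)
--         (index 5, id 1, size 3)
--         ...
--     ]
--     """
--     filemap = []
--     id, idx = 0, 0
--     for i, c in enumerate(diskmap):
--         if i % 2 == 0:
--             # file
--             size = int(c)
--             filemap.append((idx, id, size))
--             id += 1
--             idx += size
--         else:
--             # space
--             size = int(c)
--             filemap.append((idx, -1, size))
--             idx += size
--     return filemap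
-- ===== SOURCE B (Python) =====
-- def create_filemap_2(diskmap):
--     # Build the filemap BACK-TO-FRONT: compute the total disk size first,
--     # then walk the diskmap from its last digit to its first, recovering each
--     # offset by subtracting sizes from the running total; reverse at the end.
--     total = sum(int(c) for c in diskmap)
--     out = []
--     idx = total
--     for i in range(len(diskmap) - 1, -1, -1):
--         size = int(diskmap[i])
--         idx -= size
--         out.append((idx, i // 2 if i % 2 == 0 else -1, size))
--     out.reverse()
--     return out
-- ===== Notes on version B (the rewrite author's own statement) =====
-- stated objective: alternative
-- what changed: B builds the filemap back-to-front: it first computes the total disk size, then traverses the diskmap from the last digit to the first, obtaining each offset by subtracting sizes from the running total (A accumulates offsets forward with an id counter), and reverses the list at the end.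
import Mathlib
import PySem

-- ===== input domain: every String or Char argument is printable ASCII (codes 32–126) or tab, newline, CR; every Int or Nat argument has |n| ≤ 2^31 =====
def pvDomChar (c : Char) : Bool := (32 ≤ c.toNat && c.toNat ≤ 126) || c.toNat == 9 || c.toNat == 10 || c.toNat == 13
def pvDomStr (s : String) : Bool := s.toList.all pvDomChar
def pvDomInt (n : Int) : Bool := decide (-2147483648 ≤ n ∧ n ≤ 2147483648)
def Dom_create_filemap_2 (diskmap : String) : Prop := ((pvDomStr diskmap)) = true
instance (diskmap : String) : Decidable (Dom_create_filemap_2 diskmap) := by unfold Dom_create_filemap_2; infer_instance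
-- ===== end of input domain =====

-- B builds the filemap back-to-front: total size first, then a reverse traversal subtracting sizes
-- from the running total, reversed at the end (objective: alternative, same cost).


-- ===== PORT A =====
-- int(c) for a one-character string; total form of PySem.Int.ofChars?, used only under Pre_ (where it is some)
def pyIntChar (c : Char) : Int := (PySem.Int.ofChars? [c]).getD 0

-- A's loop: enumerate index i, file-id and disk-index accumulators, one tuple appended per character
def aLoop : List Char → Int → Int → Int → List (Int × Int × Int)
  | [], _, _, _ => []
  | c :: rest, i, id, idx =>
    if PySem.Int.mod i 2 == 0 then
      let size := pyIntChar c
      (idx, id, size) :: aLoop rest (i + 1) (id + 1) (idx + size)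
    else
      let size := pyIntChar c
      (idx, -1, size) :: aLoop rest (i + 1) id (idx + size)

def create_filemap_2 (diskmap : String) : List (Int × Int × Int) :=
  aLoop diskmap.toList 0 0 0

-- ===== PORT B =====
-- B's descending loop `for i in range(len-1, -1, -1): size = int(diskmap[i]); idx -= size; append`
-- rendered as recursion over the REVERSED character list with the index i counting down;
-- the final `out.reverse()` is the trailing `.reverse`.
def bLoop : List Char → Int → Int → List (Int × Int × Int)
  | [], _, _ => []
  | c :: rest, i, idx =>
    let size := pyIntChar c
    (idx - size, if PySem.Int.mod i 2 == 0 then PySem.Int.floordiv i 2 else -1, size) ::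
      bLoop rest (i - 1) (idx - size)

def create_filemap_2_alt (diskmap : String) : List (Int × Int × Int) :=
  let total := (diskmap.toList.map pyIntChar).sum
  (bLoop diskmap.toList.reverse ((diskmap.toList.length : Int) - 1) total).reverse

-- ===== PRECONDITION & SPEC =====
-- Pre_ excludes exactly the inputs where int(c) raises ValueError (a non-digit character in diskmap)
def Pre_create_filemap_2 (diskmap : String) : Prop := diskmap.toList.all Char.isDigit = true
instance (diskmap : String) : Decidable (Pre_create_filemap_2 diskmap) := by unfold Pre_create_filemap_2; infer_instance
def pvWitness_create_filemap_2 : String := "12333"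

def Spec_create_filemap_2 (diskmap : String) (out : List (Int × Int × Int)) : Prop := out = create_filemap_2_alt diskmap
instance (diskmap : String) (out : List (Int × Int × Int)) : Decidable (Spec_create_filemap_2 diskmap out) := by unfold Spec_create_filemap_2; infer_instance

-- ===== CLAIM (what is proved, stated in full; the proofs are below) =====
def Claim_equal_create_filemap_2 : Prop := ∀ (diskmap : String), Dom_create_filemap_2 diskmap → Pre_create_filemap_2 diskmap → Spec_create_filemap_2 diskmap (create_filemap_2 diskmap)

-- ===== LEMMAS AND PROOFS =====

-- common recursive specification: forward pass with explicit index and offset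
def cfSpec : List Char → Int → Int → List (Int × Int × Int)
  | [], _, _ => []
  | c :: rest, i, idx =>
    (idx, if PySem.Int.mod i 2 == 0 then PySem.Int.floordiv i 2 else -1, pyIntChar c) ::
      cfSpec rest (i + 1) (idx + pyIntChar c)

lemma sum_map_reverse (f : Char → Int) (l : List Char) :
    (l.reverse.map f).sum = (l.map f).sum := by
  rw [List.map_reverse, List.sum_reverse]

lemma aLoop_eq_spec (cs : List Char) : ∀ (i idx : Int), 0 ≤ i →
    aLoop cs i (PySem.Int.floordiv (i + 1) 2) idx = cfSpec cs i idx := by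
  induction cs with
  | nil => intro i idx _; simp [aLoop, cfSpec]
  | cons c rest ih =>
    intro i idx hi
    simp only [aLoop, cfSpec]
    rw [PySem.Int.mod_eq_emod_of_pos (a := i) (by omega),
        PySem.Int.floordiv_eq_ediv_of_pos (a := i) (by omega),
        PySem.Int.floordiv_eq_ediv_of_pos (a := i + 1) (by omega)]
    by_cases h : i % 2 = 0
    · have h1 : (i + 1) / 2 = i / 2 := by omega
      have h2 : (i + 1 + 1) / 2 = i / 2 + 1 := by omega
      have := ih (i + 1) (idx + pyIntChar c) (by omega)
      rw [PySem.Int.floordiv_eq_ediv_of_pos (a := i + 1 + 1) (by omega), h2] at this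
      simp only [h, beq_self_eq_true, if_true, h1, this]
    · have hb : (i % 2 == 0) = false := by simp [h]
      have h2 : (i + 1 + 1) / 2 = (i + 1) / 2 := by omega
      have := ih (i + 1) (idx + pyIntChar c) (by omega)
      rw [PySem.Int.floordiv_eq_ediv_of_pos (a := i + 1 + 1) (by omega), h2] at this
      simp [hb, this]

lemma cfSpec_append (xs : List Char) (c : Char) : ∀ (i idx : Int),
    cfSpec (xs ++ [c]) i idx =
      cfSpec xs i idx ++
        [(idx + (xs.map pyIntChar).sum,
          if PySem.Int.mod (i + xs.length) 2 == 0 then PySem.Int.floordiv (i + xs.length) 2 else -1,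
          pyIntChar c)] := by
  induction xs with
  | nil => intro i idx; simp [cfSpec]
  | cons x rest ih =>
    intro i idx
    simp only [List.cons_append, cfSpec, ih, List.map_cons, List.sum_cons, List.length_cons]
    push_cast
    have e1 : idx + pyIntChar x + (rest.map pyIntChar).sum
        = idx + (pyIntChar x + (rest.map pyIntChar).sum) := by ring
    have e2 : i + 1 + (rest.length : Int) = i + ((rest.length : Int) + 1) := by ring
    rw [e1, e2]

lemma bLoop_reverse_eq_spec (rs : List Char) : ∀ (i idx : Int),
    (bLoop rs i idx).reverse =
      cfSpec rs.reverse (i - rs.length + 1) (idx - (rs.map pyIntChar).sum) := by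
  induction rs with
  | nil => intro i idx; simp [bLoop, cfSpec]
  | cons c rest ih =>
    intro i idx
    simp only [bLoop, List.reverse_cons, ih, List.length_cons, List.map_cons, List.sum_cons]
    rw [cfSpec_append]
    simp only [List.length_reverse, sum_map_reverse]
    push_cast
    have h1 : i - 1 - (rest.length : Int) + 1 = i - ((rest.length : Int) + 1) + 1 := by ring
    have h2 : idx - pyIntChar c - (rest.map pyIntChar).sum
        = idx - (pyIntChar c + (rest.map pyIntChar).sum) := by ring
    have hidx : i - ((rest.length : Int) + 1) + 1 + (rest.length : Int) = i := by ring
    have hoff : idx - (pyIntChar c + (rest.map pyIntChar).sum) + (rest.map pyIntChar).sum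
        = idx - pyIntChar c := by ring
    rw [h1, h2, hidx, hoff]

-- ===== VERDICT (by name: the statement is the Claim_ definition above) =====
theorem create_filemap_2_spec : Claim_equal_create_filemap_2 := by
  intro d _ _
  unfold Spec_create_filemap_2 create_filemap_2 create_filemap_2_alt
  rw [bLoop_reverse_eq_spec]
  have ha := aLoop_eq_spec d.toList 0 0 (le_refl 0)
  have h0 : PySem.Int.floordiv (0 + 1) 2 = 0 := by decide
  rw [h0] at ha
  rw [ha]
  simp
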